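-- pv_equiv track=rewrite | github.com/tarunms7/forge-orchestrator | forge/tui/screens/final_approval.py | _summarize_task_states
-- ===== SOURCE A (Python) =====
-- def _summarize_task_states(tasks: list[dict]) -> dict[str, int]:
--     summary = {
--         "done": 0,
--         "error": 0,
--         "blocked": 0,
--         "active": 0,
--         "cancelled": 0,
--     }
--     for task in tasks:
--         state = task.get("state", task.get("review", "todo"))
--         if state == "done":
--             summary["done"] += 1
--         elif state == "error":
--             summary["error"] += 1
--         elif state == "blocked":
--             summary["blocked"] += 1
--         elif state == "cancelled":
--             summary["cancelled"] += 1
--         else: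
--             summary["active"] += 1
--     return summary
-- ===== SOURCE B (Python) =====
-- def _summarize_task_states(tasks: list[dict]) -> dict[str, int]:
--     def norm(task):
--         return task.get("state", task.get("review", "todo"))
--
--     done = sum(1 for t in tasks if norm(t) == "done")
--     error = sum(1 for t in tasks if norm(t) == "error")
--     blocked = sum(1 for t in tasks if norm(t) == "blocked")
--     cancelled = sum(1 for t in tasks if norm(t) == "cancelled")
--     active = len(tasks) - done - error - blocked - cancelled
--     return {
--         "done": done,
--         "error": error,
--         "blocked": blocked,
--         "active": active,
--         "cancelled": cancelled,
--     }
-- ===== Notes on version B (the rewrite author's own statement) =====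
-- stated objective: alternative
-- what changed: Replaces the single if/elif accumulation pass over a mutable summary dict with one counting scan per terminal state plus a complement computation for 'active', building the result dict once at the end.
import Mathlib
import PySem

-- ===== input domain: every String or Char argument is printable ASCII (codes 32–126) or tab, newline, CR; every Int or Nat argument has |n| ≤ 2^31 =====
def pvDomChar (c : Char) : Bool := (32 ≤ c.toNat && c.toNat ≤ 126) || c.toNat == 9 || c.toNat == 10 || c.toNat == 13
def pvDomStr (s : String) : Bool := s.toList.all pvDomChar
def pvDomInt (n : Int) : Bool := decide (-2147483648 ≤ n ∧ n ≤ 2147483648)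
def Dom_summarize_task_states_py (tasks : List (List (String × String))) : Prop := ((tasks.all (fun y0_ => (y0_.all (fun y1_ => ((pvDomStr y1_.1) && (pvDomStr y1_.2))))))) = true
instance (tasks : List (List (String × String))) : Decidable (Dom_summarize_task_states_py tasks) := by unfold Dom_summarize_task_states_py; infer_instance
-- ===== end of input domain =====

-- B is an alternative decomposition: one counting scan per terminal state plus a complement
-- for "active", instead of A's single if/elif accumulation pass over a mutable summary dict.

-- state = task.get("state", task.get("review", "todo"))  (shared normalization, same in Source A and Source B)
def pvNorm (task : List (String × String)) : String :=
  (PySem.Dict.ofList task).getD "state" ((PySem.Dict.ofList task).getD "review" "todo")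

-- ===== PORT A =====
def summarize_task_states_py (tasks : List (List (String × String))) : List (String × Int) :=
  let summary : PySem.Dict String Int :=
    PySem.Dict.ofList [("done", 0), ("error", 0), ("blocked", 0), ("active", 0), ("cancelled", 0)]
  let final := tasks.foldl (fun summary task =>
    let state := pvNorm task
    if state == "done" then summary.modify "done" 0 (· + 1)
    else if state == "error" then summary.modify "error" 0 (· + 1)
    else if state == "blocked" then summary.modify "blocked" 0 (· + 1)
    else if state == "cancelled" then summary.modify "cancelled" 0 (· + 1)
    else summary.modify "active" 0 (· + 1)) summary
  final.items

-- ===== PORT B =====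
def summarize_task_states_py_alt (tasks : List (List (String × String))) : List (String × Int) :=
  let done : Int := (tasks.countP (fun t => pvNorm t == "done") : Nat)
  let error : Int := (tasks.countP (fun t => pvNorm t == "error") : Nat)
  let blocked : Int := (tasks.countP (fun t => pvNorm t == "blocked") : Nat)
  let cancelled : Int := (tasks.countP (fun t => pvNorm t == "cancelled") : Nat)
  let active : Int := (tasks.length : Int) - done - error - blocked - cancelled
  [("done", done), ("error", error), ("blocked", blocked), ("active", active), ("cancelled", cancelled)]

-- ===== PRECONDITION & SPEC =====
def Spec_summarize_task_states_py (tasks : List (List (String × String))) (out : List (String × Int)) : Prop := out = summarize_task_states_py_alt tasks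
instance (tasks : List (List (String × String))) (out : List (String × Int)) : Decidable (Spec_summarize_task_states_py tasks out) := by unfold Spec_summarize_task_states_py; infer_instance

-- ===== CLAIM (what is proved, stated in full; the proofs are below) =====
def Claim_equal_summarize_task_states_py : Prop := ∀ (tasks : List (List (String × String))), Dom_summarize_task_states_py tasks → Spec_summarize_task_states_py tasks (summarize_task_states_py tasks)

-- ===== LEMMAS AND PROOFS =====

-- one step of A's loop on the literal-keyed dict, for each branch
theorem pvStep_done (d e b a c : Int) :
    (PySem.Dict.mk [("done", d), ("error", e), ("blocked", b), ("active", a), ("cancelled", c)]).modify "done" 0 (· + 1)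
    = PySem.Dict.mk [("done", d + 1), ("error", e), ("blocked", b), ("active", a), ("cancelled", c)] := rfl

theorem pvStep_error (d e b a c : Int) :
    (PySem.Dict.mk [("done", d), ("error", e), ("blocked", b), ("active", a), ("cancelled", c)]).modify "error" 0 (· + 1)
    = PySem.Dict.mk [("done", d), ("error", e + 1), ("blocked", b), ("active", a), ("cancelled", c)] := rfl

theorem pvStep_blocked (d e b a c : Int) :
    (PySem.Dict.mk [("done", d), ("error", e), ("blocked", b), ("active", a), ("cancelled", c)]).modify "blocked" 0 (· + 1)
    = PySem.Dict.mk [("done", d), ("error", e), ("blocked", b + 1), ("active", a), ("cancelled", c)] := rfl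

theorem pvStep_cancelled (d e b a c : Int) :
    (PySem.Dict.mk [("done", d), ("error", e), ("blocked", b), ("active", a), ("cancelled", c)]).modify "cancelled" 0 (· + 1)
    = PySem.Dict.mk [("done", d), ("error", e), ("blocked", b), ("active", a), ("cancelled", c + 1)] := rfl

theorem pvStep_active (d e b a c : Int) :
    (PySem.Dict.mk [("done", d), ("error", e), ("blocked", b), ("active", a), ("cancelled", c)]).modify "active" 0 (· + 1)
    = PySem.Dict.mk [("done", d), ("error", e), ("blocked", b), ("active", a + 1), ("cancelled", c)] := rfl

-- invariant of A's fold: the five counters accumulate the per-state counts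
theorem pvFold_inv (tasks : List (List (String × String))) :
    ∀ (d e b a c : Int),
    (tasks.foldl (fun summary task =>
      let state := pvNorm task
      if state == "done" then summary.modify "done" 0 (· + 1)
      else if state == "error" then summary.modify "error" 0 (· + 1)
      else if state == "blocked" then summary.modify "blocked" 0 (· + 1)
      else if state == "cancelled" then summary.modify "cancelled" 0 (· + 1)
      else summary.modify "active" 0 (· + 1))
      (PySem.Dict.mk [("done", d), ("error", e), ("blocked", b), ("active", a), ("cancelled", c)]))
    = PySem.Dict.mk
      [("done", d + (tasks.countP (fun t => pvNorm t == "done") : Nat)),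
       ("error", e + (tasks.countP (fun t => pvNorm t == "error") : Nat)),
       ("blocked", b + (tasks.countP (fun t => pvNorm t == "blocked") : Nat)),
       ("active", a + (tasks.countP (fun t => !(pvNorm t == "done") && !(pvNorm t == "error")
                        && !(pvNorm t == "blocked") && !(pvNorm t == "cancelled")) : Nat)),
       ("cancelled", c + (tasks.countP (fun t => pvNorm t == "cancelled") : Nat))] := by
  induction tasks with
  | nil => intro d e b a c; simp
  | cons t ts ih =>
    intro d e b a c
    simp only [List.foldl_cons, List.countP_cons]
    by_cases h1 : pvNorm t == "done"
    · have heq := eq_of_beq h1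
      rw [if_pos h1, pvStep_done, ih]
      simp only [PySem.Dict.mk.injEq, List.cons.injEq, Prod.mk.injEq]
      simp [heq]
      try omega
    · by_cases h2 : pvNorm t == "error"
      · have heq := eq_of_beq h2
        rw [if_neg (by simp [h1]), if_pos h2, pvStep_error, ih]
        simp only [PySem.Dict.mk.injEq, List.cons.injEq, Prod.mk.injEq]
        simp [heq]
        try omega
      · by_cases h3 : pvNorm t == "blocked"
        · have heq := eq_of_beq h3
          rw [if_neg (by simp [h1]), if_neg (by simp [h2]), if_pos h3, pvStep_blocked, ih]
          simp only [PySem.Dict.mk.injEq, List.cons.injEq, Prod.mk.injEq]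
          simp [heq]
          try omega
        · by_cases h4 : pvNorm t == "cancelled"
          · have heq := eq_of_beq h4
            rw [if_neg (by simp [h1]), if_neg (by simp [h2]), if_neg (by simp [h3]), if_pos h4,
              pvStep_cancelled, ih]
            simp only [PySem.Dict.mk.injEq, List.cons.injEq, Prod.mk.injEq]
            simp [heq]
            try omega
          · rw [if_neg (by simp [h1]), if_neg (by simp [h2]), if_neg (by simp [h3]),
              if_neg (by simp [h4]), pvStep_active, ih]
            simp only [PySem.Dict.mk.injEq, List.cons.injEq, Prod.mk.injEq]
            simp [h1, h2, h3, h4]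
            try omega

-- the five per-state counts partition the list
theorem pvPartition (tasks : List (List (String × String))) :
    tasks.countP (fun t => pvNorm t == "done")
    + tasks.countP (fun t => pvNorm t == "error")
    + tasks.countP (fun t => pvNorm t == "blocked")
    + tasks.countP (fun t => pvNorm t == "cancelled")
    + tasks.countP (fun t => !(pvNorm t == "done") && !(pvNorm t == "error")
                        && !(pvNorm t == "blocked") && !(pvNorm t == "cancelled"))
    = tasks.length := by
  induction tasks with
  | nil => simp
  | cons t ts ih =>
    simp only [List.countP_cons, List.length_cons]
    by_cases h1 : pvNorm t == "done"
    · have heq := eq_of_beq h1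
      have n2 : ¬ ((pvNorm t == "error") = true) := by simp [heq]
      have n3 : ¬ ((pvNorm t == "blocked") = true) := by simp [heq]
      have n4 : ¬ ((pvNorm t == "cancelled") = true) := by simp [heq]
      have n5 : ¬ ((!(pvNorm t == "done") && !(pvNorm t == "error")
          && !(pvNorm t == "blocked") && !(pvNorm t == "cancelled")) = true) := by simp [h1]
      rw [if_pos h1, if_neg n2, if_neg n3, if_neg n4, if_neg n5]
      omega
    · by_cases h2 : pvNorm t == "error"
      · have heq := eq_of_beq h2
        have n3 : ¬ ((pvNorm t == "blocked") = true) := by simp [heq]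
        have n4 : ¬ ((pvNorm t == "cancelled") = true) := by simp [heq]
        have n5 : ¬ ((!(pvNorm t == "done") && !(pvNorm t == "error")
            && !(pvNorm t == "blocked") && !(pvNorm t == "cancelled")) = true) := by simp [h2]
        rw [if_neg h1, if_pos h2, if_neg n3, if_neg n4, if_neg n5]
        omega
      · by_cases h3 : pvNorm t == "blocked"
        · have heq := eq_of_beq h3
          have n4 : ¬ ((pvNorm t == "cancelled") = true) := by simp [heq]
          have n5 : ¬ ((!(pvNorm t == "done") && !(pvNorm t == "error")
              && !(pvNorm t == "blocked") && !(pvNorm t == "cancelled")) = true) := by simp [h3]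
          rw [if_neg h1, if_neg h2, if_pos h3, if_neg n4, if_neg n5]
          omega
        · by_cases h4 : pvNorm t == "cancelled"
          · have n5 : ¬ ((!(pvNorm t == "done") && !(pvNorm t == "error")
                && !(pvNorm t == "blocked") && !(pvNorm t == "cancelled")) = true) := by simp [h4]
            rw [if_neg h1, if_neg h2, if_neg h3, if_pos h4, if_neg n5]
            omega
          · have p5 : (!(pvNorm t == "done") && !(pvNorm t == "error")
                && !(pvNorm t == "blocked") && !(pvNorm t == "cancelled")) = true := by
              simp [h1, h2, h3, h4]
            rw [if_neg h1, if_neg h2, if_neg h3, if_neg h4, if_pos p5]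
            omega

-- ===== VERDICT (by name: the statement is the Claim_ definition above) =====
theorem summarize_task_states_py_spec : Claim_equal_summarize_task_states_py := by
  intro tasks _
  show summarize_task_states_py tasks = summarize_task_states_py_alt tasks
  unfold summarize_task_states_py summarize_task_states_py_alt
  have hinit : (PySem.Dict.ofList [("done", (0:Int)), ("error", 0), ("blocked", 0), ("active", 0), ("cancelled", 0)])
      = PySem.Dict.mk [("done", 0), ("error", 0), ("blocked", 0), ("active", 0), ("cancelled", 0)] := rfl
  simp only [hinit, pvFold_inv]
  have hp := pvPartition tasks
  simp only [zero_add, List.cons.injEq, Prod.mk.injEq, and_true, true_and]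
  omega
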